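-- pv_equiv track=rewrite | github.com/SonJinHYo/CodingTest | 프로그래머스/unrated/155652. 둘만의 암호/둘만의 암호.py | solution
-- ===== SOURCE A (Python) =====
-- def solution(s, skip, index):
--     answer = ''
--     skip = {ord(i) for i in skip}
--     for c in s:
--         new_c = ord(c)
--         for _ in range(index):
--             new_c = new_c +1 if new_c < ord('z') else ord('a')
--             while new_c in skip:
--                 new_c = new_c +1 if new_c < ord('z') else ord('a')
--         answer += chr(new_c)
--     return answer
-- ===== SOURCE B (Python) =====
-- def solution(s, skip, index):
--     skipset = {ord(ch) for ch in skip}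
--     cycle = [v for v in range(97, 123) if v not in skipset]
--     out = []
--     for ch in s:
--         c = ord(ch)
--         if index <= 0:
--             out.append(ch)
--             continue
--         linear = [v for v in range(c + 1, 123) if v not in skipset]
--         if index <= len(linear):
--             out.append(chr(linear[index - 1]))
--         else:
--             out.append(chr(cycle[(index - len(linear) - 1) % len(cycle)]))
--     return ''.join(out)
-- ===== Notes on version B (the rewrite author's own statement) =====
-- stated objective: faster
-- what changed: A advances each character one step at a time (index iterations, each with an inner skip-scan); B precomputes the allowed codes above the character and the allowed a-z cycle once and jumps directly with list indexing and modular arithmetic.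
import Mathlib
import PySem

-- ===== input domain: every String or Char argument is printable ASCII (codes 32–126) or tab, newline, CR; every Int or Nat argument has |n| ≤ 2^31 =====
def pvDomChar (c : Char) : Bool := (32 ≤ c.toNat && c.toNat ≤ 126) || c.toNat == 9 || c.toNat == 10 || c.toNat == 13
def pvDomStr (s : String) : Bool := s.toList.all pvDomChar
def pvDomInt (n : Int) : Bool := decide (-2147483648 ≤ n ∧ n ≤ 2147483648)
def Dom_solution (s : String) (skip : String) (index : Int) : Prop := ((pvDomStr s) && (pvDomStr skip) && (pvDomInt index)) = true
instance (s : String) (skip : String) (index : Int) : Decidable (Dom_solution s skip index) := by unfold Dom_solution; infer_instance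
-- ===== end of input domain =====

-- B replaces A's per-character loop of `index` single steps (each with an inner skip-scan)
-- by a closed-form jump: the allowed codes above the character plus modular indexing into the
-- allowed a..z cycle.  Objective: faster (O(len(s)·95+26) instead of O(len(s)·index·scan)).

-- ===== PORT A =====
-- shared helper: {ord(i) for i in skip}
def pvSkip (skip : String) : PySem.Set Int :=
  PySem.Set.ofList (skip.toList.map (fun c => (c.toNat : Int)))

-- new_c = new_c + 1 if new_c < ord('z') else ord('a')
def pvNext (x : Int) : Int := if x < 122 then x + 1 else 97

-- `while new_c in skip: new_c = …` — ported by hand with fuel 200; exact on Pre_ (there the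
-- loop provably exits within 200 rounds, see pvW1/pvW2 below).
def pvWhile (sk : PySem.Set Int) : Nat → Int → Int
  | 0, x => x
  | n + 1, x => if PySem.Set.contains sk x then pvWhile sk n (pvNext x) else x

def solution (s : String) (skip : String) (index : Int) : String :=
  let sk := pvSkip skip
  String.ofList (s.toList.foldl (fun answer c =>
    let nc := (PySem.List.pyRange 0 index 1).foldl
      (fun newc _ => pvWhile sk 200 (pvNext newc)) ((c.toNat : Int))
    answer ++ [Char.ofNat nc.toNat]) [])

-- ===== PORT B =====
-- comprehension [v for v in range(a,123) if v not in skipset]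
def pvLF (sk : PySem.Set Int) (a : Int) : List Int :=
  (PySem.List.pyRange a 123 1).filter (fun v => !(PySem.Set.contains sk v))

def solution_alt (s : String) (skip : String) (index : Int) : String :=
  let sk := pvSkip skip
  let cycle := pvLF sk 97
  String.ofList (s.toList.foldl (fun out ch =>
    out ++ [if index ≤ 0 then ch
            else
              let linear := pvLF sk ((ch.toNat : Int) + 1)
              if index ≤ (linear.length : Int) then
                Char.ofNat (((PySem.List.pyGet? linear (index - 1)).getD 0).toNat)
              else
                Char.ofNat (((PySem.List.pyGet? cycle
                  (PySem.Int.mod (index - (linear.length : Int) - 1) (cycle.length : Int))).getD 0).toNat)]) [])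

-- ===== PRECONDITION & SPEC =====
-- Pre_ excludes exactly the inputs where A's inner while-loop never terminates (Python hangs):
-- index ≥ 1, every lowercase letter is in skip, and some character of s has fewer than index
-- allowed codes above it.  A returns on every input satisfying Pre_.
def Pre_solution (s : String) (skip : String) (index : Int) : Prop :=
  index ≤ 0 ∨ pvLF (pvSkip skip) 97 ≠ [] ∨
    ∀ c ∈ s.toList, index ≤ ((pvLF (pvSkip skip) ((c.toNat : Int) + 1)).length : Int)
instance (s : String) (skip : String) (index : Int) : Decidable (Pre_solution s skip index) := by
  unfold Pre_solution; infer_instance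

def pvWitness_solution : String × String × Int := ("hello", "xz", 7)

def Spec_solution (s : String) (skip : String) (index : Int) (out : String) : Prop := out = solution_alt s skip index
instance (s : String) (skip : String) (index : Int) (out : String) : Decidable (Spec_solution s skip index out) := by unfold Spec_solution; infer_instance

-- ===== CLAIM (what is proved, stated in full; the proofs are below) =====
def Claim_equal_solution : Prop := ∀ (s : String) (skip : String) (index : Int), Dom_solution s skip index → Pre_solution s skip index → Spec_solution s skip index (solution s skip index)

-- ===== LEMMAS AND PROOFS =====

-- one step of A's inner loop
def pvStep (sk : PySem.Set Int) (x : Int) : Int := pvWhile sk 200 (pvNext x)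

-- the value B assigns after k ≥ 1 steps from x
def pvTarget (sk : PySem.Set Int) (x : Int) (k : Nat) : Int :=
  if k ≤ (pvLF sk (x + 1)).length then (pvLF sk (x + 1)).getD (k - 1) 0
  else (pvLF sk 97).getD ((k - (pvLF sk (x + 1)).length - 1) % (pvLF sk 97).length) 0

theorem pvLF_nil (sk : PySem.Set Int) (a : Int) (h : 123 ≤ a) : pvLF sk a = [] := by
  unfold pvLF
  rw [PySem.List.pyRange_one_eq_nil (by omega)]
  simp

theorem pvLF_cons (sk : PySem.Set Int) (a : Int) (h : a < 123) :
    pvLF sk a = (if !(PySem.Set.contains sk a) then [a] else []) ++ pvLF sk (a + 1) := by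
  unfold pvLF
  rw [PySem.List.pyRange_one_cons h, List.filter_cons]
  cases hc : (!PySem.Set.contains sk a) <;> simp

theorem pvLF_mem (sk : PySem.Set Int) (a x : Int) (h : x ∈ pvLF sk a) : a ≤ x ∧ x < 123 := by
  unfold pvLF at h
  have := List.mem_of_mem_filter h
  exact (PySem.List.mem_pyRange_one).1 this

-- dropping past the i-th kept element of a filtered range restarts the filter just above it
theorem pvF (sk : PySem.Set Int) :
    ∀ (n : Nat) (a : Int), (123 - a).toNat ≤ n →
    ∀ (i : Nat), i < (pvLF sk a).length →
      (pvLF sk a).drop (i + 1) = pvLF sk ((pvLF sk a).getD i 0 + 1) := by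
  intro n
  induction n with
  | zero =>
      intro a ha i hi
      rw [pvLF_nil sk a (by omega)] at hi
      simp at hi
  | succ n ih =>
      intro a ha i hi
      by_cases h123 : 123 ≤ a
      · rw [pvLF_nil sk a h123] at hi; simp at hi
      · have hlt : a < 123 := by omega
        rw [pvLF_cons sk a hlt] at hi ⊢
        by_cases hc : PySem.Set.contains sk a
        · rw [hc] at hi ⊢
          simp only [Bool.not_true, Bool.false_eq_true, if_false, List.nil_append] at hi ⊢
          exact ih (a + 1) (by omega) i hi
        · have hc' : PySem.Set.contains sk a = false := by simpa using hc
          rw [hc'] at hi ⊢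
          simp only [Bool.not_false, if_true, List.singleton_append] at hi ⊢
          cases i with
          | zero => simp
          | succ i =>
              simp only [List.length_cons, Nat.succ_lt_succ_iff] at hi
              simp only [List.drop_succ_cons, List.getD_cons_succ]
              exact ih (a + 1) (by omega) i hi

-- the while-loop, when some allowed code remains in [y,123), stops at the first one
theorem pvW1 (sk : PySem.Set Int) :
    ∀ (n : Nat) (y : Int), pvLF sk y ≠ [] → (123 - y).toNat ≤ n →
      pvWhile sk n y = (pvLF sk y).headD 0 := by
  intro n
  induction n with
  | zero =>
      intro y hne hf
      exact absurd (pvLF_nil sk y (by omega)) hne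
  | succ n ih =>
      intro y hne hf
      have hlt : y < 123 := by
        by_contra h
        exact hne (pvLF_nil sk y (by omega))
      rw [pvLF_cons sk y hlt] at hne ⊢
      by_cases hc : PySem.Set.contains sk y
      · rw [hc] at hne ⊢
        simp only [Bool.not_true, Bool.false_eq_true, if_false, List.nil_append] at hne ⊢
        have hy122 : y < 122 := by
          by_contra h
          have : y = 122 := by omega
          subst this
          exact hne (pvLF_nil sk 123 (by omega))
        rw [pvWhile, if_pos hc]
        rw [show pvNext y = y + 1 from by unfold pvNext; simp [hy122]]
        exact ih (y + 1) hne (by omega)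
      · have hc' : PySem.Set.contains sk y = false := by simpa using hc
        rw [hc']
        simp only [Bool.not_false, if_true, List.singleton_append]
        rw [pvWhile, if_neg hc]
        simp

-- the while-loop, when nothing allowed remains in [y,123) but a letter is allowed,
-- wraps at 'z' and stops at the first allowed letter
theorem pvW2 (sk : PySem.Set Int) :
    ∀ (n : Nat) (y : Int), pvLF sk y = [] → y ≤ 122 → pvLF sk 97 ≠ [] →
      (123 - y).toNat + 26 ≤ n → pvWhile sk n y = (pvLF sk 97).headD 0 := by
  intro n
  induction n with
  | zero => intro y _ hy _ hf; omega
  | succ n ih =>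
      intro y hnil hy hA hf
      have hlt : y < 123 := by omega
      have hc : PySem.Set.contains sk y = true := by
        by_contra hc
        have hc' : PySem.Set.contains sk y = false := by simpa using hc
        rw [pvLF_cons sk y hlt, hc'] at hnil
        simp at hnil
      rw [pvWhile, if_pos hc]
      by_cases hy122 : y < 122
      · rw [show pvNext y = y + 1 from by unfold pvNext; simp [hy122]]
        have : pvLF sk (y + 1) = [] := by
          rw [pvLF_cons sk y hlt, hc] at hnil
          simpa using hnil
        exact ih (y + 1) this (by omega) hA (by omega)
      · have : y = 122 := by omega
        subst this
        rw [show pvNext 122 = 97 from by unfold pvNext; simp]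
        exact pvW1 sk n 97 hA (by omega)

theorem pvHeadD_append (l t : List Int) (h : l ≠ []) : (l ++ t).headD 0 = l.headD 0 := by
  cases l with
  | nil => exact absurd rfl h
  | cons a l => simp

theorem pvHeadD_drop (l : List Int) (k : Nat) (h : k < l.length) :
    (l.drop k).headD 0 = l.getD k 0 := by
  have h0 : 0 < (l.drop k).length := by rw [List.length_drop]; omega
  have h1 : (l.drop k).headD 0 = (l.drop k).getD 0 0 := by
    cases l.drop k <;> simp
  rw [h1, List.getD_eq_getElem _ 0 h0, List.getD_eq_getElem _ 0 h]
  simp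

-- one step of A equals the head of (allowed codes above x ++ allowed letters)
theorem pvS (sk : PySem.Set Int) (x : Int) (hx0 : 0 ≤ x) (hx : x ≤ 126)
    (hne : pvLF sk (x + 1) ++ pvLF sk 97 ≠ []) :
    pvStep sk x = (pvLF sk (x + 1) ++ pvLF sk 97).headD 0 := by
  unfold pvStep
  by_cases hx122 : x < 122
  · rw [show pvNext x = x + 1 from by unfold pvNext; simp [hx122]]
    by_cases hL : pvLF sk (x + 1) = []
    · have hA : pvLF sk 97 ≠ [] := by simpa [hL] using hne
      rw [hL, List.nil_append]
      exact pvW2 sk 200 (x + 1) hL (by omega) hA (by omega)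
    · rw [pvHeadD_append _ _ hL]
      exact pvW1 sk 200 (x + 1) hL (by omega)
  · rw [show pvNext x = 97 from by unfold pvNext; simp [hx122]]
    have hL : pvLF sk (x + 1) = [] := pvLF_nil sk (x + 1) (by omega)
    have hA : pvLF sk 97 ≠ [] := by simpa [hL] using hne
    rw [hL, List.nil_append]
    exact pvW1 sk 200 97 hA (by omega)

theorem pvGetD_mem (l : List Int) (i : Nat) (h : i < l.length) : l.getD i 0 ∈ l := by
  rw [List.getD_eq_getElem l 0 h]
  exact List.getElem_mem h

-- k ≥ 1 iterated steps of A compute B's closed form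
theorem pvI (sk : PySem.Set Int) :
    ∀ (k : Nat) (x : Int), 1 ≤ k → 0 ≤ x → x ≤ 126 →
      (k ≤ (pvLF sk (x + 1)).length ∨ pvLF sk 97 ≠ []) →
      (pvStep sk)^[k] x = pvTarget sk x k := by
  intro k
  induction k with
  | zero => intro x h1; omega
  | succ k ih =>
      intro x _ hx0 hx hyp
      by_cases hk0 : k = 0
      · subst hk0
        -- base case k+1 = 1
        have hne : pvLF sk (x + 1) ++ pvLF sk 97 ≠ [] := by
          rcases hyp with h | h
          · intro hc
            have := List.append_eq_nil_iff.1 hc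
            rw [this.1] at h; simp at h
          · intro hc
            exact h (List.append_eq_nil_iff.1 hc).2
        rw [Function.iterate_one, pvS sk x hx0 hx hne]
        unfold pvTarget
        by_cases hm : 1 ≤ (pvLF sk (x + 1)).length
        · simp only [hm, if_true]
          have hL : pvLF sk (x + 1) ≠ [] := by
            intro h; rw [h] at hm; simp at hm
          rw [pvHeadD_append _ _ hL]
          cases hE : pvLF sk (x + 1) with
          | nil => exact absurd hE hL
          | cons a l => simp
        · simp only [hm, if_false]
          have hL : pvLF sk (x + 1) = [] := by
            cases hE : pvLF sk (x + 1) with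
            | nil => rfl
            | cons a l => rw [hE] at hm; simp at hm
          have hA : pvLF sk 97 ≠ [] := by simpa [hL] using hne
          rw [hL, List.nil_append]
          cases hE : pvLF sk 97 with
          | nil => exact absurd hE hA
          | cons a l => simp
      · -- inductive step: k ≥ 1
        have hk1 : 1 ≤ k := by omega
        have hyp' : k ≤ (pvLF sk (x + 1)).length ∨ pvLF sk 97 ≠ [] := by
          rcases hyp with h | h
          · exact Or.inl (by omega)
          · exact Or.inr h
        rw [Function.iterate_succ_apply', ih x hk1 hx0 hx hyp']
        set L := pvLF sk (x + 1) with hLdef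
        set A := pvLF sk 97 with hAdef
        set m := L.length with hmdef
        unfold pvTarget
        by_cases hkm : k ≤ m
        · -- currently in the linear phase
          have hkm1 : k - 1 < m := by omega
          simp only [← hLdef, ← hAdef, ← hmdef, hkm, if_true]
          have hrL : L.getD (k - 1) 0 ∈ L := pvGetD_mem L (k - 1) hkm1
          obtain ⟨hr1, hr2⟩ := pvLF_mem sk (x + 1) _ hrL
          set r := L.getD (k - 1) 0 with hrdef
          have hdrop : L.drop k = pvLF sk (r + 1) := by
            have := pvF sk 123 (x + 1) (by omega) (k - 1) hkm1
            rw [show k - 1 + 1 = k from by omega] at this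
            exact this
          have hstep : pvStep sk r = (L.drop k ++ A).headD 0 := by
            rw [hdrop]
            exact pvS sk r (by omega) (by omega) (by
              rw [← hdrop]
              intro hc
              have := List.append_eq_nil_iff.1 hc
              rcases hyp with h | h
              · have : L.drop k = [] := this.1
                have := List.length_drop (l := L) (i := k) ▸ congrArg List.length this
                simp at this
                omega
              · exact h this.2)
          rw [hstep]
          by_cases hkm' : k + 1 ≤ m
          · simp only [hkm', if_true]
            have hdk : L.drop k ≠ [] := by
              intro hc
              have := congrArg List.length hc
              simp at this
              omega
            rw [pvHeadD_append _ _ hdk, pvHeadD_drop L k (by omega)]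
            congr 1
          · simp only [hkm', if_false]
            have hkm'' : k = m := by omega
            have hA : A ≠ [] := by
              rcases hyp with h | h
              · omega
              · exact h
            have hdk : L.drop k = [] := by
              apply List.eq_nil_of_length_eq_zero
              rw [List.length_drop]
              omega
            rw [hdk, List.nil_append]
            rw [show k + 1 - m - 1 = 0 from by omega, Nat.zero_mod]
            cases hE : A with
            | nil => exact absurd hE hA
            | cons a l => simp
        · -- in the cycle phase
          have hA : A ≠ [] := by
            rcases hyp with h | h
            · omega
            · exact h
          have hn : 0 < A.length := List.length_pos_iff.2 hA
          simp only [← hLdef, ← hAdef, ← hmdef, hkm, if_false]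
          set i := (k - m - 1) % A.length with hidef
          have hiA : i < A.length := Nat.mod_lt _ hn
          have hrA : A.getD i 0 ∈ A := pvGetD_mem A i hiA
          obtain ⟨hr1, hr2⟩ := pvLF_mem sk 97 _ hrA
          set r := A.getD i 0 with hrdef
          have hdrop : pvLF sk (r + 1) = A.drop (i + 1) := by
            have := pvF sk 123 97 (by omega) i hiA
            exact this.symm
          have hstep : pvStep sk r = (A.drop (i + 1) ++ A).headD 0 := by
            rw [← hdrop]
            exact pvS sk r (by omega) (by omega) (by
              rw [hdrop]
              intro hc
              exact hA (List.append_eq_nil_iff.1 hc).2)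
          rw [hstep]
          have hkm1 : ¬ (k + 1 ≤ m) := by omega
          simp only [hkm1, if_false]
          have hmod : (k + 1 - m - 1) % A.length = (i + 1) % A.length := by
            rw [show k + 1 - m - 1 = (k - m - 1) + 1 from by omega, hidef, Nat.mod_add_mod]
          by_cases hi1 : i + 1 < A.length
          · have hdk : A.drop (i + 1) ≠ [] := by
              intro hc
              have := congrArg List.length hc
              simp at this
              omega
            rw [pvHeadD_append _ _ hdk, pvHeadD_drop A (i + 1) hi1]
            rw [hmod, Nat.mod_eq_of_lt hi1]
          · have hi1' : i + 1 = A.length := by omega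
            have hdk : A.drop (i + 1) = [] := by
              apply List.eq_nil_of_length_eq_zero
              rw [List.length_drop]
              omega
            rw [hdk, List.nil_append]
            rw [hmod, hi1', Nat.mod_self]
            cases hE : A with
            | nil => exact absurd hE hA
            | cons a l => simp

theorem pvFoldlIter (f : Int → Int) : ∀ (l : List Int) (x : Int),
    l.foldl (fun a _ => f a) x = f^[l.length] x := by
  intro l
  induction l with
  | nil => intro x; simp
  | cons a l ih =>
      intro x
      simp only [List.foldl_cons, List.length_cons, Function.iterate_succ_apply]
      exact ih (f x)

theorem pvFoldlMap (g : Char → Char) : ∀ (l : List Char) (acc : List Char),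
    l.foldl (fun a c => a ++ [g c]) acc = acc ++ l.map g := by
  intro l
  induction l with
  | nil => intro acc; simp
  | cons a l ih => intro acc; simp [ih]

-- per-character agreement
theorem pvCharEq (sk : PySem.Set Int) (index : Int) (c : Char) (hc : c.toNat ≤ 126)
    (hpre : index ≤ 0 ∨ pvLF sk 97 ≠ [] ∨ index ≤ ((pvLF sk ((c.toNat : Int) + 1)).length : Int)) :
    Char.ofNat ((PySem.List.pyRange 0 index 1).foldl
        (fun newc _ => pvWhile sk 200 (pvNext newc)) ((c.toNat : Int))).toNat
    = (if index ≤ 0 then c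
       else
         let linear := pvLF sk ((c.toNat : Int) + 1)
         if index ≤ (linear.length : Int) then
           Char.ofNat (((PySem.List.pyGet? linear (index - 1)).getD 0).toNat)
         else
           Char.ofNat (((PySem.List.pyGet? (pvLF sk 97)
             (PySem.Int.mod (index - (linear.length : Int) - 1) ((pvLF sk 97).length : Int))).getD 0).toNat)) := by
  by_cases h0 : index ≤ 0
  · rw [PySem.List.pyRange_one_eq_nil (by omega)]
    simp [h0, Char.ofNat_toNat]
  · simp only [h0, if_false]
    set L := pvLF sk ((c.toNat : Int) + 1) with hLdef
    set A := pvLF sk 97 with hAdef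
    set m := L.length with hmdef
    set k := index.toNat with hkdef
    have hk1 : 1 ≤ k := by omega
    have hidx : index = (k : Int) := by omega
    have hhyp : k ≤ m ∨ A ≠ [] := by
      rcases hpre with h | h | h
      · omega
      · exact Or.inr h
      · exact Or.inl (by omega)
    have hfold : (PySem.List.pyRange 0 index 1).foldl
        (fun newc _ => pvWhile sk 200 (pvNext newc)) ((c.toNat : Int))
        = (pvStep sk)^[k] (c.toNat : Int) := by
      have h1 := pvFoldlIter (pvStep sk) (PySem.List.pyRange 0 index 1) ((c.toNat : Int))
      simp only [PySem.List.length_pyRange_one] at h1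
      rw [show (index - 0).toNat = k from by omega] at h1
      exact h1
    rw [hfold, pvI sk k (c.toNat : Int) hk1 (Int.natCast_nonneg _) (by exact_mod_cast hc) hhyp]
    unfold pvTarget
    simp only [← hLdef, ← hAdef, ← hmdef]
    by_cases hkm : k ≤ m
    · simp only [hkm, if_true]
      have : index ≤ (m : Int) := by omega
      simp only [this, if_true]
      have hknat : index - 1 = ((k - 1 : Nat) : Int) := by omega
      rw [hknat, PySem.List.pyGet?_natCast]
      have hlt : k - 1 < m := by omega
      rw [List.getElem?_eq_getElem hlt]
      rw [List.getD_eq_getElem L 0 hlt]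
      rfl
    · simp only [hkm, if_false]
      have : ¬ (index ≤ (m : Int)) := by omega
      simp only [this, if_false]
      have hA : A ≠ [] := by
        rcases hhyp with h | h
        · omega
        · exact h
      have hn : 0 < A.length := List.length_pos_iff.2 hA
      have harg : index - (m : Int) - 1 = ((k - m - 1 : Nat) : Int) := by omega
      rw [harg, show ((A.length : Nat) : Int) = ((A.length : Nat) : Int) from rfl]
      rw [PySem.Int.mod_natCast, PySem.List.pyGet?_natCast]
      have hlt : (k - m - 1) % A.length < A.length := Nat.mod_lt _ hn
      rw [List.getElem?_eq_getElem hlt]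
      rw [List.getD_eq_getElem A 0 hlt]
      rfl

-- ===== VERDICT (by name: the statement is the Claim_ definition above) =====
theorem solution_spec : Claim_equal_solution := by
  intro s skip index hdom hpre
  show solution s skip index = solution_alt s skip index
  unfold solution solution_alt
  simp only []
  congr 1
  rw [pvFoldlMap, pvFoldlMap, List.nil_append, List.nil_append]
  apply List.map_congr_left
  intro c hc
  have hdc : pvDomChar c = true := by
    unfold Dom_solution at hdom
    simp only [Bool.and_eq_true] at hdom
    have := hdom.1.1
    unfold pvDomStr at this
    rw [List.all_eq_true] at this
    exact this c hc
  have hc126 : c.toNat ≤ 126 := by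
    unfold pvDomChar at hdc
    simp only [Bool.or_eq_true, Bool.and_eq_true, beq_iff_eq, decide_eq_true_eq] at hdc
    obtain ((⟨_, h⟩ | h) | h) | h := hdc <;> omega
  have hpre' : index ≤ 0 ∨ pvLF (pvSkip skip) 97 ≠ [] ∨
      index ≤ ((pvLF (pvSkip skip) ((c.toNat : Int) + 1)).length : Int) := by
    rcases hpre with h | h | h
    · exact Or.inl h
    · exact Or.inr (Or.inl h)
    · exact Or.inr (Or.inr (h c hc))
  exact pvCharEq (pvSkip skip) index c hc126 hpre'
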